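-- pv_equiv track=rewrite | github.com/danieleschmidt/formal-circuits-gpt | src/formal_circuits_gpt/research/multi_agent_proof_discovery.py | _are_complementary_insight_types
-- ===== SOURCE A (Python) =====
-- from typing import List, Dict, Any, Optional, Tuple, Set, Union
--
-- def _are_complementary_insight_types(types1: Set[str], types2: Set[str]) -> bool:
--     """Check if two sets of insight types are complementary."""
--     # Define complementary pairs
--     complementary_pairs = [
--         ('algebraic_structure', 'geometric'),
--         ('logical_analysis', 'creative_approach'),
--         ('temporal_property', 'inductive_structure'),
--         ('critique', 'synthesized_strategy')
--     ]
--
--     for type1 in types1: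
--         for type2 in types2:
--             for pair in complementary_pairs:
--                 if (type1 in pair[0] and type2 in pair[1]) or \
--                    (type1 in pair[1] and type2 in pair[0]):
--                     return True
--
--     return False
-- ===== SOURCE B (Python) =====
-- def _are_complementary_insight_types(types1, types2):
--     """Check if two sets of insight types are complementary."""
--     slots = ['algebraic_structure', 'geometric',
--              'logical_analysis', 'creative_approach',
--              'temporal_property', 'inductive_structure',
--              'critique', 'synthesized_strategy']
--
--     def mask(types):
--         m = 0
--         for i, slot in enumerate(slots):
--             if any(t in slot for t in types):
--                 m |= 1 << i
--         return m
--
--     m1, m2 = mask(types1), mask(types2)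
--     for j in range(4):
--         if (m1 >> (2 * j)) & 1 and (m2 >> (2 * j + 1)) & 1:
--             return True
--         if (m1 >> (2 * j + 1)) & 1 and (m2 >> (2 * j)) & 1:
--             return True
--     return False
-- ===== Notes on version B (the rewrite author's own statement) =====
-- stated objective: faster
-- what changed: B precomputes one 8-bit membership bitmask per side (a single pass over each set against the eight slot strings) and then decides complementarity by testing bit pairs of the two masks, instead of A's triple nested loop over all (type1, type2, pair) combinations.
import Mathlib
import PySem

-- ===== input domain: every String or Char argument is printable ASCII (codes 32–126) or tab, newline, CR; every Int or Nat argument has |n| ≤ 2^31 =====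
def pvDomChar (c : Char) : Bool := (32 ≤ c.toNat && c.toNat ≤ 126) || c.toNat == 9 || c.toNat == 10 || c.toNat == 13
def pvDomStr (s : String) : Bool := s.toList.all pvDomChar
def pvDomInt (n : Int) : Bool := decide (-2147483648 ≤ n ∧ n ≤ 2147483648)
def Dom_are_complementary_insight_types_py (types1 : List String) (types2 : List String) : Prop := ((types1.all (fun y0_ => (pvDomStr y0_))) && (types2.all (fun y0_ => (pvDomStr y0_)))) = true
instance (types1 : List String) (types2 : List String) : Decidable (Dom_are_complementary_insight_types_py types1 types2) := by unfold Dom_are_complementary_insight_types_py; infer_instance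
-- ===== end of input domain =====

-- header: B builds one 8-bit substring-membership bitmask per input set and decides complementarity by bit tests on the two masks (alternative algorithm, same result).

-- ===== PORT A =====
def pvPairsA : List (String × String) :=
  [("algebraic_structure", "geometric"),
   ("logical_analysis", "creative_approach"),
   ("temporal_property", "inductive_structure"),
   ("critique", "synthesized_strategy")]

def are_complementary_insight_types_py (types1 : List String) (types2 : List String) : Bool :=
  types1.any (fun type1 =>
    types2.any (fun type2 =>
      pvPairsA.any (fun pair =>
        (PySem.Str.isIn type1 pair.1 && PySem.Str.isIn type2 pair.2) ||
        (PySem.Str.isIn type1 pair.2 && PySem.Str.isIn type2 pair.1))))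

-- ===== PORT B =====
def pvSlots : List String :=
  ["algebraic_structure", "geometric",
   "logical_analysis", "creative_approach",
   "temporal_property", "inductive_structure",
   "critique", "synthesized_strategy"]

-- mask(types): for i, slot in enumerate(slots): if any(t in slot for t in types): m |= 1 << i
def pvMask (types : List String) : Nat :=
  pvSlots.zipIdx.foldl
    (fun m p => if types.any (fun t => PySem.Str.isIn t p.1) then m ||| (1 <<< p.2) else m) 0

def are_complementary_insight_types_py_alt (types1 : List String) (types2 : List String) : Bool :=
  let m1 := pvMask types1
  let m2 := pvMask types2
  (List.range 4).any (fun j =>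
    ((m1 >>> (2 * j)) &&& 1 == 1 && (m2 >>> (2 * j + 1)) &&& 1 == 1) ||
    ((m1 >>> (2 * j + 1)) &&& 1 == 1 && (m2 >>> (2 * j)) &&& 1 == 1))

-- ===== PRECONDITION & SPEC =====
def Spec_are_complementary_insight_types_py (types1 : List String) (types2 : List String) (out : Bool) : Prop := out = are_complementary_insight_types_py_alt types1 types2
instance (types1 : List String) (types2 : List String) (out : Bool) : Decidable (Spec_are_complementary_insight_types_py types1 types2 out) := by unfold Spec_are_complementary_insight_types_py; infer_instance

-- ===== CLAIM (what is proved, stated in full; the proofs are below) =====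
def Claim_equal_are_complementary_insight_types_py : Prop := ∀ (types1 : List String) (types2 : List String), Dom_are_complementary_insight_types_py types1 types2 → Spec_are_complementary_insight_types_py types1 types2 (are_complementary_insight_types_py types1 types2)

-- ===== LEMMAS AND PROOFS =====

-- (m >>> k) &&& 1 == 1 is exactly Nat.testBit
theorem pv_bitget_eq_testBit (m k : Nat) : ((m >>> k) &&& 1 == 1 : Bool) = m.testBit k := by
  simp [Nat.testBit, Nat.and_one_is_mod, Nat.one_and_eq_mod_two]

-- bit k of the mask fold: initial bit or some enumerated slot with index k is hit
theorem pv_mask_fold_testBit (ts : List String) (l : List (String × Nat)) (m k : Nat) :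
    ((l.foldl (fun m p => if ts.any (fun t => PySem.Str.isIn t p.1) then m ||| (1 <<< p.2) else m) m).testBit k)
    = (m.testBit k || l.any (fun p => decide (k = p.2) && ts.any (fun t => PySem.Str.isIn t p.1))) := by
  induction l generalizing m with
  | nil => simp
  | cons p l ih =>
    simp only [List.foldl_cons, List.any_cons]
    by_cases h : ts.any (fun t => PySem.Str.isIn t p.1) = true
    · rw [if_pos h, ih]
      have hb : (m ||| (1 <<< p.2)).testBit k = (m.testBit k || decide (k = p.2)) := by
        simp [Nat.testBit_or, Nat.shiftLeft_eq, Nat.testBit_two_pow, eq_comm]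
      rw [hb, h]
      cases m.testBit k <;> cases (decide (k = p.2) : Bool) <;> simp
    · have h' : (ts.any fun t => PySem.Str.isIn t p.1) = false := by
        revert h; cases ts.any fun t => PySem.Str.isIn t p.1 <;> simp
      rw [if_neg h, ih, h']
      simp

-- A's triple nested scan equals a per-pair, per-side existence check
theorem pv_swap_lemma (types1 types2 : List String) (L : List (String × String)) :
    (types1.any (fun t1 => types2.any (fun t2 => L.any (fun p =>
        (PySem.Str.isIn t1 p.1 && PySem.Str.isIn t2 p.2) ||
        (PySem.Str.isIn t1 p.2 && PySem.Str.isIn t2 p.1)))))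
  = (L.any (fun p =>
      (types1.any (fun t => PySem.Str.isIn t p.1) && types2.any (fun t => PySem.Str.isIn t p.2)) ||
      (types1.any (fun t => PySem.Str.isIn t p.2) && types2.any (fun t => PySem.Str.isIn t p.1)))) := by
  apply Bool.eq_iff_iff.mpr
  simp only [List.any_eq_true, Bool.or_eq_true, Bool.and_eq_true]
  constructor
  · rintro ⟨t1, h1, t2, h2, p, hp, hc⟩
    exact ⟨p, hp, hc.imp (fun ⟨a, b⟩ => ⟨⟨t1, h1, a⟩, ⟨t2, h2, b⟩⟩)
                         (fun ⟨a, b⟩ => ⟨⟨t1, h1, a⟩, ⟨t2, h2, b⟩⟩)⟩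
  · rintro ⟨p, hp, ⟨⟨t1, h1, a⟩, ⟨t2, h2, b⟩⟩ | ⟨⟨t1, h1, a⟩, ⟨t2, h2, b⟩⟩⟩
    · exact ⟨t1, h1, t2, h2, p, hp, Or.inl ⟨a, b⟩⟩
    · exact ⟨t1, h1, t2, h2, p, hp, Or.inr ⟨a, b⟩⟩

-- bit k (k < 8) of pvMask ts = whether ts hits slot k
theorem pv_mask_testBit (ts : List String) (k : Nat) (hk : k < 8) :
    (pvMask ts).testBit k
    = ts.any (fun t => PySem.Str.isIn t (pvSlots.getD k "")) := by
  unfold pvMask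
  rw [pv_mask_fold_testBit]
  interval_cases k <;> simp [pvSlots, List.zipIdx]

-- ===== VERDICT (by name: the statement is the Claim_ definition above) =====
theorem are_complementary_insight_types_py_spec : Claim_equal_are_complementary_insight_types_py := by
  intro types1 types2 _
  show are_complementary_insight_types_py types1 types2 = are_complementary_insight_types_py_alt types1 types2
  unfold are_complementary_insight_types_py are_complementary_insight_types_py_alt
  rw [pv_swap_lemma]
  simp only [pv_bitget_eq_testBit]
  rw [show (4 : Nat) = 3 + 1 from rfl]
  simp only [List.range_succ, List.range_zero, List.any_append, List.any_cons, List.any_nil]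
  rw [pv_mask_testBit types1 0 (by norm_num), pv_mask_testBit types2 1 (by norm_num),
      pv_mask_testBit types1 1 (by norm_num), pv_mask_testBit types2 0 (by norm_num),
      pv_mask_testBit types1 2 (by norm_num), pv_mask_testBit types2 3 (by norm_num),
      pv_mask_testBit types1 3 (by norm_num), pv_mask_testBit types2 2 (by norm_num),
      pv_mask_testBit types1 4 (by norm_num), pv_mask_testBit types2 5 (by norm_num),
      pv_mask_testBit types1 5 (by norm_num), pv_mask_testBit types2 4 (by norm_num),
      pv_mask_testBit types1 6 (by norm_num), pv_mask_testBit types2 7 (by norm_num),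
      pv_mask_testBit types1 7 (by norm_num), pv_mask_testBit types2 6 (by norm_num)]
  simp [pvPairsA, pvSlots, Bool.or_assoc]
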